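-- pv_equiv track=rewrite | github.com/jschnab/leetcode | arrays/destroy_sequential_targets.py | destroy
-- ===== SOURCE A (Python) =====
-- from collections import defaultdict
--
-- def destroy(A, space):
--     count = defaultdict(int)
--     for n in A:
--         count[n % space] += 1
--     result = A[0]
--     for n in A[1:]:
--         if count[result % space] == count[n % space]:
--             result = min(result, n)
--         elif count[result % space] < count[n % space]:
--             result = n
--     return result
-- ===== SOURCE B (Python) =====
-- from collections import defaultdict
--
-- def destroy(A, space):
--     count = defaultdict(int)
--     for n in A:
--         count[n % space] += 1
--     best = max(count[n % space] for n in A)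
--     return min(n for n in A if count[n % space] == best)
-- ===== Notes on version B (the rewrite author's own statement) =====
-- stated objective: alternative
-- what changed: The running best/branching fold over A[1:] is replaced by a different decomposition: after the same counting pass, compute the maximal group count with max() and then select with min() the smallest element of any maximal-count group.
import Mathlib
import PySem

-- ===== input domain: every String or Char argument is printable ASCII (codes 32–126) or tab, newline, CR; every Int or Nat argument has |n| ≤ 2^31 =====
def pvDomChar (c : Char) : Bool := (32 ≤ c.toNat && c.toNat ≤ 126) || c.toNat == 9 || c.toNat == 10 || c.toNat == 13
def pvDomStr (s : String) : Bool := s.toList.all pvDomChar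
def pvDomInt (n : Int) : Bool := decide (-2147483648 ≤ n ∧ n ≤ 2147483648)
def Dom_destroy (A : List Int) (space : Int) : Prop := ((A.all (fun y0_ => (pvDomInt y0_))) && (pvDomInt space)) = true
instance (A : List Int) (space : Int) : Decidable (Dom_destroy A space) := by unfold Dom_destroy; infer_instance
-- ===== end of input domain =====

-- B keeps A's counting pass but replaces the branching best-so-far fold by max-count-then-min selection (alternative decomposition, same cost).

-- ===== PORT A =====
def destroy (A : List Int) (space : Int) : Int :=
  let count := A.foldl (fun d n => d.modify (PySem.Int.mod n space) 0 (· + 1))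
                 (PySem.Dict.empty : PySem.Dict Int Int)
  let result := (PySem.List.pyGet? A 0).getD 0   -- A[0]; empty A excluded by Pre_
  (PySem.List.slice A (some 1) none).foldl
    (fun result n =>
      if count.getD (PySem.Int.mod result space) 0 = count.getD (PySem.Int.mod n space) 0 then
        min result n
      else if count.getD (PySem.Int.mod result space) 0 < count.getD (PySem.Int.mod n space) 0 then
        n
      else result)
    result

-- ===== PORT B =====
def destroy_alt (A : List Int) (space : Int) : Int :=
  let count := A.foldl (fun d n => d.modify (PySem.Int.mod n space) 0 (· + 1))
                 (PySem.Dict.empty : PySem.Dict Int Int)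
  let best := (PySem.List.max? (A.map (fun n => count.getD (PySem.Int.mod n space) 0))
                 (fun x => x)).getD 0   -- max(...); empty A excluded by Pre_
  (PySem.List.min? (A.filter (fun n => count.getD (PySem.Int.mod n space) 0 == best))
      (fun x => x)).getD 0   -- min(...); nonempty whenever A is

-- ===== PRECONDITION & SPEC =====
-- Pre_ excludes exactly the inputs where A raises: empty A (IndexError at A[0]) and space = 0 (ZeroDivisionError).
def Pre_destroy (A : List Int) (space : Int) : Prop := A ≠ [] ∧ space ≠ 0
instance (A : List Int) (space : Int) : Decidable (Pre_destroy A space) := by unfold Pre_destroy; infer_instance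
def pvWitness_destroy : List Int × Int := ([1, 2, 7, 4], 3)
def Spec_destroy (A : List Int) (space : Int) (out : Int) : Prop := out = destroy_alt A space
instance (A : List Int) (space : Int) (out : Int) : Decidable (Spec_destroy A space out) := by unfold Spec_destroy; infer_instance

-- ===== CLAIM (what is proved, stated in full; the proofs are below) =====
def Claim_equal_destroy : Prop := ∀ (A : List Int) (space : Int), Dom_destroy A space → Pre_destroy A space → Spec_destroy A space (destroy A space)

-- ===== LEMMAS AND PROOFS =====

-- A's fold step, over an arbitrary score function c
def pvStep (c : Int → Int) (r n : Int) : Int :=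
  if c r = c n then min r n else if c r < c n then n else r

-- the characterization: m is an element of maximal score, minimal among those
def pvBest (c : Int → Int) (xs : List Int) (m : Int) : Prop :=
  m ∈ xs ∧ (∀ x ∈ xs, c x ≤ c m) ∧ (∀ x ∈ xs, c x = c m → m ≤ x)

theorem pvBest_unique (c : Int → Int) (xs : List Int) (m₁ m₂ : Int)
    (h₁ : pvBest c xs m₁) (h₂ : pvBest c xs m₂) : m₁ = m₂ := by
  obtain ⟨hm₁, hmax₁, hmin₁⟩ := h₁
  obtain ⟨hm₂, hmax₂, hmin₂⟩ := h₂
  have e : c m₁ = c m₂ := le_antisymm (hmax₂ m₁ hm₁) (hmax₁ m₂ hm₂)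
  have l₁ : m₁ ≤ m₂ := hmin₁ m₂ hm₂ e.symm
  have l₂ : m₂ ≤ m₁ := hmin₂ m₁ hm₁ e
  omega

theorem pvFold_best (c : Int → Int) (L : List Int) (a : Int) :
    pvBest c (a :: L) (L.foldl (pvStep c) a) := by
  induction L generalizing a with
  | nil => exact ⟨List.mem_singleton.mpr rfl, by simp, by simp⟩
  | cons n L ih =>
    obtain ⟨hm, hmax, hmin⟩ := ih (pvStep c a n)
    simp only [List.foldl_cons]
    have hstep_mem : pvStep c a n = a ∨ pvStep c a n = n := by
      unfold pvStep
      split_ifs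
      · exact min_choice a n
      · right; rfl
      · left; rfl
    have hca : c a ≤ c (pvStep c a n) := by
      unfold pvStep
      split_ifs with h1 h2
      · rcases min_choice a n with h | h <;> rw [h] <;> omega
      · omega
      · exact le_refl _
    have hcn : c n ≤ c (pvStep c a n) := by
      unfold pvStep
      split_ifs with h1 h2
      · rcases min_choice a n with h | h <;> rw [h] <;> omega
      · exact le_refl _
      · omega
    have hstep_le_a : c (pvStep c a n) = c a → pvStep c a n ≤ a := by
      intro he
      unfold pvStep at he ⊢
      split_ifs at he ⊢ with h1 h2
      · exact min_le_left a n
      · omega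
      · exact le_refl a
    have hstep_le_n : c (pvStep c a n) = c n → pvStep c a n ≤ n := by
      intro he
      unfold pvStep at he ⊢
      split_ifs at he ⊢ with h1 h2
      · exact min_le_right a n
      · exact le_refl n
      · omega
    have hs : c (pvStep c a n) ≤ c (List.foldl (pvStep c) (pvStep c a n) L) :=
      hmax _ (by simp)
    refine ⟨?_, ?_, ?_⟩
    · simp only [List.mem_cons] at hm ⊢
      rcases hm with h | h
      · rcases hstep_mem with he | he
        · exact Or.inl (h.trans he)
        · exact Or.inr (Or.inl (h.trans he))
      · exact Or.inr (Or.inr h)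
    · intro x hx
      simp only [List.mem_cons] at hx
      rcases hx with rfl | rfl | hx
      · exact le_trans hca hs
      · exact le_trans hcn hs
      · exact hmax x (by simp [hx])
    · intro x hx he
      simp only [List.mem_cons] at hx
      rcases hx with rfl | rfl | hx
      · have hea : c (pvStep c x n) = c x := by omega
        have h1 := hmin (pvStep c x n) (by simp) (by omega)
        exact le_trans h1 (hstep_le_a hea)
      · have hen : c (pvStep c a x) = c x := by omega
        have h1 := hmin (pvStep c a x) (by simp) (by omega)
        exact le_trans h1 (hstep_le_n hen)
      · exact hmin x (by simp [hx]) he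

theorem pvAlt_best (c : Int → Int) (A : List Int) (hA : A ≠ []) :
    pvBest c A ((PySem.List.min? (A.filter (fun n => c n == (PySem.List.max? (A.map c) (fun x => x)).getD 0)) (fun x => x)).getD 0) := by
  -- max? of the nonempty mapped list
  obtain ⟨b, hb⟩ : ∃ b, PySem.List.max? (A.map c) (fun x => x) = some b := by
    cases h : PySem.List.max? (A.map c) (fun x => x) with
    | none =>
      rw [PySem.List.max?_eq_none_iff] at h
      exact absurd (List.map_eq_nil_iff.mp h) hA
    | some b => exact ⟨b, rfl⟩
  have hbmem : b ∈ A.map c := PySem.List.max?_mem hb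
  have hbmax : ∀ y ∈ A.map c, y ≤ b := fun y hy => PySem.List.max?_isMax hb y hy
  obtain ⟨x₀, hx₀A, hx₀⟩ := List.mem_map.mp hbmem
  have hfil : x₀ ∈ A.filter (fun n => c n == (PySem.List.max? (A.map c) (fun x => x)).getD 0) := by
    simp [List.mem_filter, hx₀A, hb, hx₀]
  obtain ⟨m, hm⟩ : ∃ m, PySem.List.min? (A.filter (fun n => c n == (PySem.List.max? (A.map c) (fun x => x)).getD 0)) (fun x => x) = some m := by
    cases h : PySem.List.min? (A.filter (fun n => c n == (PySem.List.max? (A.map c) (fun x => x)).getD 0)) (fun x => x) with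
    | none =>
      rw [PySem.List.min?_eq_none_iff] at h
      rw [h] at hfil
      exact absurd hfil (List.not_mem_nil)
    | some m => exact ⟨m, rfl⟩
  have hmmem := PySem.List.min?_mem hm
  have hmmin : ∀ y ∈ A.filter (fun n => c n == (PySem.List.max? (A.map c) (fun x => x)).getD 0), m ≤ y :=
    fun y hy => PySem.List.min?_isMin hm y hy
  rw [hm]
  simp only [Option.getD_some]
  have hmA : m ∈ A := (List.mem_filter.mp hmmem).1
  have hcm : c m = b := by
    have := (List.mem_filter.mp hmmem).2
    simpa [hb] using this
  refine ⟨hmA, ?_, ?_⟩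
  · intro x hx
    rw [hcm]
    exact hbmax (c x) (List.mem_map.mpr ⟨x, hx, rfl⟩)
  · intro x hx he
    exact hmmin x (by simp [List.mem_filter, hx, hb, he, hcm])

-- ===== VERDICT (by name: the statement is the Claim_ definition above) =====
theorem destroy_spec : Claim_equal_destroy := by
  intro A space _ hPre
  obtain ⟨hA, _⟩ := hPre
  unfold Spec_destroy destroy destroy_alt
  obtain ⟨a, L, rfl⟩ := List.exists_cons_of_ne_nil hA
  set cdict := (a :: L).foldl (fun d n => d.modify (PySem.Int.mod n space) 0 (· + 1))
                 (PySem.Dict.empty : PySem.Dict Int Int) with hcdict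
  set c : Int → Int := fun n => cdict.getD (PySem.Int.mod n space) 0 with hc
  have h1 : pvBest c (a :: L) (L.foldl (pvStep c) a) := pvFold_best c L a
  have h2 := pvAlt_best c (a :: L) (by simp)
  have e1 : (PySem.List.slice (a :: L) (some 1) none).foldl
      (fun result n =>
        if cdict.getD (PySem.Int.mod result space) 0 = cdict.getD (PySem.Int.mod n space) 0 then
          min result n
        else if cdict.getD (PySem.Int.mod result space) 0 < cdict.getD (PySem.Int.mod n space) 0 then
          n
        else result)
      ((PySem.List.pyGet? (a :: L) 0).getD 0) = L.foldl (pvStep c) a := by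
    rw [PySem.List.slice_from_one]
    simp only [PySem.List.pyGet?_zero_cons, Option.getD_some, List.tail_cons]
    rfl
  simp only []
  rw [e1]
  exact pvBest_unique c (a :: L) _ _ h1 h2

-- ===== TEMPLATES: (deleted) =====
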